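-- pv_equiv track=rewrite | github.com/pedroalexleite/BCS-FCUP | Artificial Intelligence/Project 4/utils.py | downright_utility
-- ===== SOURCE A (Python) =====
-- def conta(countx, counto):
--     if counto == 3 and countx == 0:
--         return -50
--     if counto == 2 and countx == 0:
--         return -10
--     if counto == 1 and countx == 0:
--         return -1
--     if (counto == 0 and countx == 0) or (countx != 0 and counto != 0):
--         return 0
--     if countx == 3 and counto == 0:
--         return 50
--     if countx == 2 and counto == 0:
--         return 10
--     if countx == 1 and counto == 0:
--         return 1
--     if counto == 4:
--         return -512
--
--     return 512
--
-- def downright_utility(cur, i, j):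
--     countx = 0
--     counto = 0
--
--     for k in range(4):
--         if cur[i + k][j + k] == 'O':
--             counto += 1
--         if cur[i + k][j + k] == 'X':
--             countx += 1
--
--     return conta(countx, counto)
-- ===== SOURCE B (Python) =====
-- def downright_utility(cur, i, j):
--     # Streaming sign-magnitude automaton: the state IS the running score.
--     # Seeing an X promotes a non-negative score along 0->1->10->50->512;
--     # seeing an O demotes a non-positive score along 0->-1->-10->-50->-512;
--     # the first time both symbols have been seen the window is dead: return 0.
--     promote = {0: 1, 1: 10, 10: 50, 50: 512}
--     score = 0
--     for k in range(4):
--         c = cur[i + k][j + k]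
--         if c == 'X':
--             if score < 0:
--                 return 0
--             score = promote[score]
--         elif c == 'O':
--             if score > 0:
--                 return 0
--             score = -promote[-score]
--     return score
-- ===== Notes on version B (the rewrite author's own statement) =====
-- stated objective: alternative
-- what changed: B never counts symbols: it runs a single-pass sign-magnitude automaton whose state is the running score itself (promoted along 0,1,10,50,512 per symbol seen, early-exiting with 0 the moment both symbols appear), replacing A's two counters plus the nine-branch conta mapping.
import Mathlib
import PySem

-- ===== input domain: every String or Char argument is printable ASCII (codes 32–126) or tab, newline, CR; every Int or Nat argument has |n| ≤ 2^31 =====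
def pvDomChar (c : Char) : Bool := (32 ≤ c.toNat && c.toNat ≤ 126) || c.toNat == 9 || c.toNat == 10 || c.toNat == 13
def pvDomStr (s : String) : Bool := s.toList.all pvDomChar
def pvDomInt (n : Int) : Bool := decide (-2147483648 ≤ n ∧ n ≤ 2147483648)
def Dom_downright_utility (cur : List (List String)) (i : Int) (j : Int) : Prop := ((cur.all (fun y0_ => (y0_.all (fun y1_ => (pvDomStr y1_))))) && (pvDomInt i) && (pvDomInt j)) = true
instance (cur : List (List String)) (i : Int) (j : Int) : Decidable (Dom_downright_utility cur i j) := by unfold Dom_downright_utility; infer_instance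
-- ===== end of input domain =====

-- B replaces A's two counters + nine-branch conta by a single-pass sign-magnitude automaton whose state is the running score; objective: alternative. Return values proved equal wherever A does not raise.

-- ===== PORT A =====
def conta (countx counto : Int) : Int :=
  if counto = 3 ∧ countx = 0 then -50
  else if counto = 2 ∧ countx = 0 then -10
  else if counto = 1 ∧ countx = 0 then -1
  else if (counto = 0 ∧ countx = 0) ∨ (countx ≠ 0 ∧ counto ≠ 0) then 0
  else if countx = 3 ∧ counto = 0 then 50
  else if countx = 2 ∧ counto = 0 then 10
  else if countx = 1 ∧ counto = 0 then 1
  else if counto = 4 then -512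
  else 512

def downright_utility (cur : List (List String)) (i : Int) (j : Int) : Int :=
  let st := (PySem.List.pyRange 0 4 1).foldl (fun (st : Int × Int) k =>
    let c := ((PySem.List.pyGet? ((PySem.List.pyGet? cur (i + k)).getD []) (j + k)).getD "")
    let counto := if c = "O" then st.2 + 1 else st.2
    let countx := if c = "X" then st.1 + 1 else st.1
    (countx, counto)) (0, 0)
  conta st.1 st.2

-- ===== PORT B =====
def pvPromote : PySem.Dict Int Int := PySem.Dict.ofList [(0, 1), (1, 10), (10, 50), (50, 512)]

-- promote[score]: getD's default 0 is unreachable (with at most 4 symbols the looked-up state is always a key), so this is exact where Python B returns.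
def pvAltLoop (cur : List (List String)) (i : Int) (j : Int) : List Int → Int → Int
  | [], score => score
  | k :: ks, score =>
    let c := (PySem.List.pyGet? ((PySem.List.pyGet? cur (i + k)).getD []) (j + k)).getD ""
    if c = "X" then
      if score < 0 then 0 else pvAltLoop cur i j ks (PySem.Dict.getD pvPromote score 0)
    else if c = "O" then
      if score > 0 then 0 else pvAltLoop cur i j ks (-(PySem.Dict.getD pvPromote (-score) 0))
    else pvAltLoop cur i j ks score

def downright_utility_alt (cur : List (List String)) (i : Int) (j : Int) : Int :=
  pvAltLoop cur i j (PySem.List.pyRange 0 4 1) 0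

-- ===== PRECONDITION & SPEC =====
-- Pre_ excludes exactly the inputs on which A raises IndexError: some diagonal access cur[i+k][j+k] (k = 0..3, Python negative indexing allowed) is out of range.
def Pre_downright_utility (cur : List (List String)) (i : Int) (j : Int) : Prop :=
  ∀ k ∈ ([0, 1, 2, 3] : List Int),
    ((PySem.List.pyGet? cur (i + k)).bind (fun row => PySem.List.pyGet? row (j + k))).isSome = true
instance (cur : List (List String)) (i : Int) (j : Int) : Decidable (Pre_downright_utility cur i j) := by unfold Pre_downright_utility; infer_instance

def pvWitness_downright_utility : List (List String) × Int × Int :=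
  ([["X", ".", ".", "."], [".", "X", ".", "."], [".", ".", "O", "."], [".", ".", ".", "."]], 0, 0)

def Spec_downright_utility (cur : List (List String)) (i : Int) (j : Int) (out : Int) : Prop := out = downright_utility_alt cur i j
instance (cur : List (List String)) (i : Int) (j : Int) (out : Int) : Decidable (Spec_downright_utility cur i j out) := by unfold Spec_downright_utility; infer_instance

-- ===== CLAIM (what is proved, stated in full; the proofs are below) =====
def Claim_equal_downright_utility : Prop := ∀ (cur : List (List String)) (i : Int) (j : Int), Dom_downright_utility cur i j → Pre_downright_utility cur i j → Spec_downright_utility cur i j (downright_utility cur i j)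

-- ===== LEMMAS AND PROOFS =====

set_option maxHeartbeats 1600000 in
-- Core equivalence over the four cell values themselves: A's count-then-conta
-- equals B's score automaton, by exhausting the X/O/other status of each cell.
theorem pv_cells (c0 c1 c2 c3 : String) :
    (let st := ([c0, c1, c2, c3]).foldl (fun (st : Int × Int) c =>
        let counto := if c = "O" then st.2 + 1 else st.2
        let countx := if c = "X" then st.1 + 1 else st.1
        (countx, counto)) (0, 0);
      conta st.1 st.2) =
    (([c0, c1, c2, c3]).foldr (fun c (rest : Int → Int) score =>
        if c = "X" then
          if score < 0 then 0 else rest (PySem.Dict.getD pvPromote score 0)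
        else if c = "O" then
          if score > 0 then 0 else rest (-(PySem.Dict.getD pvPromote (-score) 0))
        else rest score) id 0) := by
  have g0 : PySem.Dict.getD pvPromote 0 0 = 1 := by decide
  have g1 : PySem.Dict.getD pvPromote 1 0 = 10 := by decide
  have g2 : PySem.Dict.getD pvPromote 10 0 = 50 := by decide
  have g3 : PySem.Dict.getD pvPromote 50 0 = 512 := by decide
  by_cases h0 : c0 = "X" <;> by_cases h0' : c0 = "O" <;>
  by_cases h1 : c1 = "X" <;> by_cases h1' : c1 = "O" <;>
  by_cases h2 : c2 = "X" <;> by_cases h2' : c2 = "O" <;>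
  by_cases h3 : c3 = "X" <;> by_cases h3' : c3 = "O" <;>
    simp_all [conta, g0, g1, g2, g3]

-- pvAltLoop over a cons list is one automaton step followed by the rest.
theorem pv_altLoop_eq_foldr (cur : List (List String)) (i j : Int) (ks : List Int) (s : Int) :
    pvAltLoop cur i j ks s =
      (ks.map (fun k => (PySem.List.pyGet? ((PySem.List.pyGet? cur (i + k)).getD []) (j + k)).getD "")).foldr
        (fun c (rest : Int → Int) score =>
          if c = "X" then
            if score < 0 then 0 else rest (PySem.Dict.getD pvPromote score 0)
          else if c = "O" then
            if score > 0 then 0 else rest (-(PySem.Dict.getD pvPromote (-score) 0))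
          else rest score) id s := by
  induction ks generalizing s with
  | nil => simp [pvAltLoop]
  | cons k t ih => simp [pvAltLoop, ih]

-- ===== VERDICT (by name: the statement is the Claim_ definition above) =====
theorem downright_utility_spec : Claim_equal_downright_utility := by
  intro cur i j _ _
  unfold Spec_downright_utility downright_utility downright_utility_alt
  rw [pv_altLoop_eq_foldr]
  have hR : PySem.List.pyRange 0 4 1 = [0, 1, 2, 3] := by decide
  rw [hR]
  simp only [List.map]
  exact pv_cells _ _ _ _
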